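-- pv_equiv track=rewrite | github.com/u6579559/Application-Hardening-Macro-setting | src/userApplicationHardening/Application_Hardening.py | convert_to_boolean
-- ===== SOURCE A (Python) =====
-- def convert_to_boolean(array, val):
--     if val == 1:
--         count = 0
--         for value in array:
--             if value == 'Not Configured':
--                 continue
--             if value:
--                 count = count + 1
--             if not value:
--                 return False
--         if count > 0:
--             return True
--         return False
--     else:
--         for value in array:
--             if value == 'Not Configured':
--                 value = False
--             if not value:
--                 return False
--         return True
-- ===== SOURCE B (Python) =====
-- def convert_to_boolean(array, val):
--     empties = array.count('')
--     ncs = array.count('Not Configured')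
--     if val == 1:
--         return empties == 0 and ncs < len(array)
--     return empties == 0 and ncs == 0
-- ===== Notes on version B (the rewrite author's own statement) =====
-- stated objective: alternative
-- what changed: Replaces A's single manual loop with early returns and a running counter by an occurrence-counting formulation: count '' and 'Not Configured' once with list.count and decide each mode by arithmetic comparisons on those counts (no per-element branching or early exit).
import Mathlib
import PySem

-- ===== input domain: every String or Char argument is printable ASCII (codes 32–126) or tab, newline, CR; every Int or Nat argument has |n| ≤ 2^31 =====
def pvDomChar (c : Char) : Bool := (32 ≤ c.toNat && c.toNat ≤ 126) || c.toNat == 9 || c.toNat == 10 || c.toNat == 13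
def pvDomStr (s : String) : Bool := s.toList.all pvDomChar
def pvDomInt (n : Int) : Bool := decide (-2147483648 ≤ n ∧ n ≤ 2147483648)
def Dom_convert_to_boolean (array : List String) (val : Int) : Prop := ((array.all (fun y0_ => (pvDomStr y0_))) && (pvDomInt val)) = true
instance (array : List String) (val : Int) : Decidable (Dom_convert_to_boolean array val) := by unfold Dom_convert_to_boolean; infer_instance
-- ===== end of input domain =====

-- B replaces A's manual loop (running counter, early returns) by counting the
-- occurrences of '' and 'Not Configured' once and deciding each mode by
-- arithmetic comparisons on those counts; objective: alternative decomposition.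

-- ===== PORT A =====
-- the val == 1 loop of A: count accumulator, early return False on a falsy value
def pvA_loop1 (xs : List String) (count : Int) : Bool :=
  match xs with
  | [] => count > 0
  | v :: rest =>
    if v = "Not Configured" then pvA_loop1 rest count
    else if v ≠ "" then pvA_loop1 rest (count + 1)
    else false

-- the else-branch loop of A: 'Not Configured' is replaced by False, falsy returns False
def pvA_loop2 (xs : List String) : Bool :=
  match xs with
  | [] => true
  | v :: rest =>
    if v = "Not Configured" then false
    else if v = "" then false
    else pvA_loop2 rest

def convert_to_boolean (array : List String) (val : Int) : Bool :=
  if val = 1 then pvA_loop1 array 0 else pvA_loop2 array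

-- ===== PORT B =====
def convert_to_boolean_alt (array : List String) (val : Int) : Bool :=
  let empties := PySem.List.count array ""
  let ncs := PySem.List.count array "Not Configured"
  if val = 1 then empties == 0 && decide (ncs < array.length)
  else empties == 0 && ncs == 0

-- ===== PRECONDITION & SPEC =====
def Spec_convert_to_boolean (array : List String) (val : Int) (out : Bool) : Prop := out = convert_to_boolean_alt array val
instance (array : List String) (val : Int) (out : Bool) : Decidable (Spec_convert_to_boolean array val out) := by unfold Spec_convert_to_boolean; infer_instance

-- ===== CLAIM =====
def Claim_equal_convert_to_boolean : Prop := ∀ (array : List String) (val : Int), Dom_convert_to_boolean array val → Spec_convert_to_boolean array val (convert_to_boolean array val)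

-- ===== LEMMAS AND PROOFS =====
theorem pvBeqZero (n : Nat) : (n == 0) = decide (n = 0) := by cases n <;> simp

-- invariant of A's counting loop, in terms of occurrence counts
theorem pvA_loop1_eq (xs : List String) (count : Int) (hc : 0 ≤ count) :
    pvA_loop1 xs count =
      (decide (xs.count "" = 0) &&
       (decide (count > 0) || decide (xs.count "Not Configured" < xs.length))) := by
  induction xs generalizing count with
  | nil => simp [pvA_loop1]
  | cons v rest ih =>
    by_cases hnc : v = "Not Configured"
    · have : ("" : String) ≠ "Not Configured" := by decide
      simp [pvA_loop1, hnc, ih count hc]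
    · by_cases he : v = ""
      · simp [pvA_loop1, he]
      · have hc1 : (0:Int) ≤ count + 1 := by omega
        have hle : rest.count "Not Configured" ≤ rest.length := List.count_le_length
        simp [pvA_loop1, hnc, he, ih (count+1) hc1, hc, hle]

theorem pvA_loop2_eq (xs : List String) :
    pvA_loop2 xs = (decide (xs.count "" = 0) && decide (xs.count "Not Configured" = 0)) := by
  induction xs with
  | nil => simp [pvA_loop2]
  | cons v rest ih =>
    by_cases hnc : v = "Not Configured"
    · simp [pvA_loop2, hnc]
    · by_cases he : v = ""
      · simp [pvA_loop2, he]
      · simp [pvA_loop2, hnc, he, ih]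

-- ===== VERDICT =====
theorem convert_to_boolean_spec : Claim_equal_convert_to_boolean := by
  intro array val _
  unfold Spec_convert_to_boolean convert_to_boolean convert_to_boolean_alt
  by_cases h1 : val = 1
  · simp [h1, pvA_loop1_eq array 0 le_rfl, PySem.List.count_eq, pvBeqZero]
  · simp [h1, pvA_loop2_eq, PySem.List.count_eq, pvBeqZero]
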